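-- pv_equiv track=rewrite | github.com/jony100200/-Kalponic-Studio-Toolbox- | Apps/KS AutoModel/src/ks_automodel/core/app_profiler.py | _infer_tasks
-- ===== SOURCE A (Python) =====
-- from typing import Dict, Iterable, List, Set
--
-- PYTHON_IMPORT_PATTERNS = {
--     "segmentation": {"semantic", "segmentation", "u2net", "deeplab", "mask"},
--     "object_detection": {"yolo", "detectron", "detr", "mmdet"},
--     "captioning": {"clip", "blip", "caption", "lavis"},
--     "super_resolution": {"realesrgan", "srgan", "esrgan"},
--     "classification": {"resnet", "efficientnet", "classifier"},
--     "ocr": {"ocr", "easyocr", "tesseract"},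
--     "speech_to_text": {"whisper", "asr"},
-- }
--
-- def _infer_tasks(imports: Set[str], summary: str) -> List[str]:
--     tasks: Set[str] = set()
--     lower_summary = summary.lower()
--     for task, keywords in PYTHON_IMPORT_PATTERNS.items():
--         if any(keyword in imports for keyword in keywords):
--             tasks.add(task)
--     if "detection" in lower_summary:
--         tasks.add("object_detection")
--     if "caption" in lower_summary:
--         tasks.add("captioning")
--     if "segment" in lower_summary or "matting" in lower_summary:
--         tasks.add("segmentation")
--     if not tasks:
--         tasks.add("classification")
--     return sorted(tasks)
-- ===== SOURCE B (Python) =====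
-- from typing import Dict, Iterable, List, Set
--
-- PYTHON_IMPORT_PATTERNS = {
--     "segmentation": {"semantic", "segmentation", "u2net", "deeplab", "mask"},
--     "object_detection": {"yolo", "detectron", "detr", "mmdet"},
--     "captioning": {"clip", "blip", "caption", "lavis"},
--     "super_resolution": {"realesrgan", "srgan", "esrgan"},
--     "classification": {"resnet", "efficientnet", "classifier"},
--     "ocr": {"ocr", "easyocr", "tesseract"},
--     "speech_to_text": {"whisper", "asr"},
-- }
--
-- # Inverted index: keyword -> task (keywords are disjoint across tasks).
-- _KEYWORD_TO_TASK = {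
--     keyword: task
--     for task, keywords in PYTHON_IMPORT_PATTERNS.items()
--     for keyword in keywords
-- }
--
-- # Summary substring rules as data.
-- _SUMMARY_RULES = [
--     ("detection", "object_detection"),
--     ("caption", "captioning"),
--     ("segment", "segmentation"),
--     ("matting", "segmentation"),
-- ]
--
-- def _infer_tasks(imports: Set[str], summary: str) -> List[str]:
--     lower = summary.lower()
--     hits = [_KEYWORD_TO_TASK[name] for name in imports if name in _KEYWORD_TO_TASK]
--     hits += [task for word, task in _SUMMARY_RULES if word in lower]
--     return sorted(set(hits)) or ["classification"]
-- ===== Notes on version B (the rewrite author's own statement) =====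
-- stated objective: alternative
-- what changed: B inverts the pattern table into a keyword-to-task dict and a summary rule table, collects all triggered tasks as a flat list in one pass over imports plus one pass over the rules, and returns sorted(set(hits)) or ['classification'], instead of A's incremental set built by scanning each task's keyword set against imports and four explicit if-adds with a separate fallback branch.
import Mathlib
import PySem

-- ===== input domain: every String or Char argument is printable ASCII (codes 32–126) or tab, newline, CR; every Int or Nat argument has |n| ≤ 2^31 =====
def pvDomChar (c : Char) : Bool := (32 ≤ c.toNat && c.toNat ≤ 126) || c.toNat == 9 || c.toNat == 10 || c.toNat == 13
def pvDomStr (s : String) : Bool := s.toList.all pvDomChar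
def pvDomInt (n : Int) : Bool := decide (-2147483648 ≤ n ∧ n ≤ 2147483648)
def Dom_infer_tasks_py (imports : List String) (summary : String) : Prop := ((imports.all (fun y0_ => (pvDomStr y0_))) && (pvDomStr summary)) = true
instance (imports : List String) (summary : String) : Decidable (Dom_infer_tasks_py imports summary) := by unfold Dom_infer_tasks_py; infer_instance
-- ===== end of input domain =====

-- B inverts the pattern table into a keyword→task index plus a summary rule table, collects
-- all triggered tasks as a flat list and returns sorted(set(hits)) or ["classification"],
-- instead of A's incremental set with per-task scans and explicit if-adds (objective: alternative).

-- ===== PORT A =====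
-- PYTHON_IMPORT_PATTERNS in insertion order (the keyword-set order is irrelevant: only `any` consumes it)
def pyPatterns : List (String × List String) :=
  [("segmentation", ["semantic", "segmentation", "u2net", "deeplab", "mask"]),
   ("object_detection", ["yolo", "detectron", "detr", "mmdet"]),
   ("captioning", ["clip", "blip", "caption", "lavis"]),
   ("super_resolution", ["realesrgan", "srgan", "esrgan"]),
   ("classification", ["resnet", "efficientnet", "classifier"]),
   ("ocr", ["ocr", "easyocr", "tesseract"]),
   ("speech_to_text", ["whisper", "asr"])]

def infer_tasks_py (imports : List String) (summary : String) : List String :=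
  let tasks : PySem.Set String := PySem.Set.empty
  let lower_summary := PySem.Str.lower summary
  let tasks := pyPatterns.foldl
    (fun ts p => if p.2.any (fun keyword => imports.contains keyword) then PySem.Set.add ts p.1 else ts) tasks
  let tasks := if PySem.Str.isIn "detection" lower_summary then PySem.Set.add tasks "object_detection" else tasks
  let tasks := if PySem.Str.isIn "caption" lower_summary then PySem.Set.add tasks "captioning" else tasks
  let tasks := if PySem.Str.isIn "segment" lower_summary || PySem.Str.isIn "matting" lower_summary then PySem.Set.add tasks "segmentation" else tasks
  let tasks := if tasks = [] then PySem.Set.add tasks "classification" else tasks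
  PySem.List.sorted tasks (fun x => x) false

-- ===== PORT B =====
-- _KEYWORD_TO_TASK: the dict comprehension flattening the pattern table into keyword → task
def kwToTask : PySem.Dict String String :=
  pyPatterns.foldl (fun d p => p.2.foldl (fun d keyword => d.insert keyword p.1) d) PySem.Dict.empty

-- _SUMMARY_RULES
def summaryRules : List (String × String) :=
  [("detection", "object_detection"), ("caption", "captioning"),
   ("segment", "segmentation"), ("matting", "segmentation")]

def infer_tasks_py_alt (imports : List String) (summary : String) : List String :=
  let lower := PySem.Str.lower summary
  -- [_KEYWORD_TO_TASK[name] for name in imports if name in _KEYWORD_TO_TASK]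
  let hits := imports.filterMap (fun name => kwToTask.get? name)
  -- hits += [task for word, task in _SUMMARY_RULES if word in lower]
  let hits := hits ++ summaryRules.filterMap (fun r => if PySem.Str.isIn r.1 lower then some r.2 else none)
  -- sorted(set(hits)) or ["classification"]
  let result := PySem.List.sorted (PySem.Set.ofList hits) (fun x => x) false
  if result = [] then ["classification"] else result

-- ===== PRECONDITION & SPEC =====
def Spec_infer_tasks_py (imports : List String) (summary : String) (out : List String) : Prop := out = infer_tasks_py_alt imports summary
instance (imports : List String) (summary : String) (out : List String) : Decidable (Spec_infer_tasks_py imports summary out) := by unfold Spec_infer_tasks_py; infer_instance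

-- ===== CLAIM (what is proved, stated in full; the proofs are below) =====
def Claim_equal_infer_tasks_py : Prop := ∀ (imports : List String) (summary : String), Dom_infer_tasks_py imports summary → Spec_infer_tasks_py imports summary (infer_tasks_py imports summary)

-- ===== LEMMAS AND PROOFS =====

-- membership in A's pattern-phase fold
theorem mem_afold_gen (ps : List (String × List String)) (imports : List String)
    (init : PySem.Set String) (x : String) :
    x ∈ ps.foldl (fun ts p => if p.2.any (fun keyword => imports.contains keyword) then PySem.Set.add ts p.1 else ts) init
      ↔ x ∈ init ∨ ∃ p ∈ ps, x = p.1 ∧ p.2.any (fun keyword => imports.contains keyword) = true := by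
  induction ps generalizing init with
  | nil => simp
  | cons a ps ih =>
    simp only [List.foldl_cons]
    by_cases h : a.2.any (fun keyword => imports.contains keyword) = true
    · have h' : ∃ y ∈ a.2, y ∈ imports := by simpa using h
      rw [if_pos h, ih]; simp [PySem.Set.mem_add]
      constructor
      · rintro ((hx | rfl) | hr)
        exacts [Or.inl hx, Or.inr (Or.inl ⟨rfl, h'⟩), Or.inr (Or.inr hr)]
      · rintro (hx | ⟨rfl, -⟩ | hr)
        exacts [Or.inl (Or.inl hx), Or.inl (Or.inr rfl), Or.inr hr]
    · have h' : ¬ ∃ y ∈ a.2, y ∈ imports := by simpa using h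
      rw [if_neg h, ih]; simp
      constructor
      · rintro (hx | hr)
        exacts [Or.inl hx, Or.inr (Or.inr hr)]
      · rintro (hx | ⟨-, hc⟩ | hr)
        exacts [Or.inl hx, absurd hc h', Or.inr hr]

theorem nodup_afold_gen (ps : List (String × List String)) (imports : List String)
    (init : PySem.Set String) (h : init.Nodup) :
    (ps.foldl (fun ts p => if p.2.any (fun keyword => imports.contains keyword) then PySem.Set.add ts p.1 else ts) init).Nodup := by
  induction ps generalizing init with
  | nil => exact h
  | cons a ps ih =>
    simp only [List.foldl_cons]
    by_cases hc : a.2.any (fun keyword => imports.contains keyword) = true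
    · rw [if_pos hc]; exact ih _ (PySem.Set.nodup_add _ _ h)
    · rw [if_neg hc]; exact ih _ h

-- every keyword of a pattern entry looks up to that entry's task
theorem lookup_of_mem_kws (p : String × List String) (hp : p ∈ pyPatterns) (s : String)
    (hs : s ∈ p.2) : kwToTask.get? s = some p.1 := by
  fin_cases hp <;> fin_cases hs <;> rfl

-- a successful assoc-list lookup is a member of the list
theorem get?_mk_mem {l : List (String × String)} {s t : String}
    (h : (PySem.Dict.mk l).get? s = some t) : (s, t) ∈ l := by
  induction l with
  | nil => simp [PySem.Dict.get?] at h
  | cons a l ih =>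
    rw [PySem.Dict.get?_mk_cons] at h
    by_cases he : a.1 == s
    · rw [if_pos he] at h
      have : a = (s, t) := by
        obtain ⟨a1, a2⟩ := a
        simp_all [beq_iff_eq]
      simp [this]
    · rw [if_neg he] at h
      exact List.mem_cons_of_mem _ (ih h)

-- a successful lookup in the inverted index comes from a keyword of some pattern entry
theorem mem_pattern_of_lookup (s t : String) (h : kwToTask.get? s = some t) :
    ∃ p ∈ pyPatterns, t = p.1 ∧ s ∈ p.2 := by
  rw [show kwToTask = PySem.Dict.mk
    [("semantic", "segmentation"), ("segmentation", "segmentation"), ("u2net", "segmentation"),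
     ("deeplab", "segmentation"), ("mask", "segmentation"),
     ("yolo", "object_detection"), ("detectron", "object_detection"), ("detr", "object_detection"),
     ("mmdet", "object_detection"),
     ("clip", "captioning"), ("blip", "captioning"), ("caption", "captioning"), ("lavis", "captioning"),
     ("realesrgan", "super_resolution"), ("srgan", "super_resolution"), ("esrgan", "super_resolution"),
     ("resnet", "classification"), ("efficientnet", "classification"), ("classifier", "classification"),
     ("ocr", "ocr"), ("easyocr", "ocr"), ("tesseract", "ocr"),
     ("whisper", "speech_to_text"), ("asr", "speech_to_text")] from rfl] at h
  have hm := get?_mk_mem h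
  simp only [List.mem_cons, List.not_mem_nil, or_false, Prod.mk.injEq] at hm
  rcases hm with ⟨rfl, rfl⟩ | ⟨rfl, rfl⟩ | ⟨rfl, rfl⟩ | ⟨rfl, rfl⟩ | ⟨rfl, rfl⟩ | ⟨rfl, rfl⟩ |
    ⟨rfl, rfl⟩ | ⟨rfl, rfl⟩ | ⟨rfl, rfl⟩ | ⟨rfl, rfl⟩ | ⟨rfl, rfl⟩ | ⟨rfl, rfl⟩ | ⟨rfl, rfl⟩ |
    ⟨rfl, rfl⟩ | ⟨rfl, rfl⟩ | ⟨rfl, rfl⟩ | ⟨rfl, rfl⟩ | ⟨rfl, rfl⟩ | ⟨rfl, rfl⟩ | ⟨rfl, rfl⟩ |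
    ⟨rfl, rfl⟩ | ⟨rfl, rfl⟩ | ⟨rfl, rfl⟩ | ⟨rfl, rfl⟩ <;> decide

-- A's import phase collects exactly the tasks B's lookups over imports hit
theorem afold_iff_lookup (imports : List String) (x : String) :
    (x ∈ pyPatterns.foldl
        (fun ts p => if p.2.any (fun keyword => imports.contains keyword) then PySem.Set.add ts p.1 else ts)
        PySem.Set.empty)
    ↔ ∃ name ∈ imports, kwToTask.get? name = some x := by
  rw [mem_afold_gen]
  simp only [PySem.Set.empty, List.not_mem_nil, false_or]
  constructor
  · rintro ⟨p, hp, rfl, hany⟩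
    obtain ⟨kw, hkw, hin⟩ := by simpa using hany
    exact ⟨kw, hin, lookup_of_mem_kws p hp kw hkw⟩
  · rintro ⟨name, hname, hget⟩
    obtain ⟨p, hp, rfl, hskw⟩ := mem_pattern_of_lookup name _ hget
    exact ⟨p, hp, rfl, by simp only [List.any_eq_true]; exact ⟨name, hskw, by simpa using hname⟩⟩

-- A's tail: the three conditional adds and the fallback, as named helpers (proof-only)
def addIfB (c : Bool) (t : String) (s : PySem.Set String) : PySem.Set String :=
  if c then PySem.Set.add s t else s

def pvFallback (s : PySem.Set String) : PySem.Set String :=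
  if s = [] then PySem.Set.add s "classification" else s

theorem addIfB_nodup (c : Bool) (t : String) (s : PySem.Set String) (h : s.Nodup) :
    (addIfB c t s).Nodup := by
  cases c
  · simpa [addIfB] using h
  · simpa [addIfB] using PySem.Set.nodup_add _ _ h

theorem port_a_eq (imports : List String) (summary : String) :
    infer_tasks_py imports summary
      = PySem.List.sorted
          (pvFallback (addIfB (PySem.Str.isIn "segment" (PySem.Str.lower summary) || PySem.Str.isIn "matting" (PySem.Str.lower summary)) "segmentation"
            (addIfB (PySem.Str.isIn "caption" (PySem.Str.lower summary)) "captioning"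
              (addIfB (PySem.Str.isIn "detection" (PySem.Str.lower summary)) "object_detection"
                (pyPatterns.foldl
                  (fun ts p => if p.2.any (fun keyword => imports.contains keyword) then PySem.Set.add ts p.1 else ts)
                  PySem.Set.empty)))))
          (fun x => x) false := rfl

-- B's hits list, membership
theorem mem_hits (imports : List String) (summary : String) (x : String) :
    (x ∈ imports.filterMap (fun name => kwToTask.get? name)
        ++ summaryRules.filterMap (fun r => if PySem.Str.isIn r.1 (PySem.Str.lower summary) then some r.2 else none))
    ↔ ((∃ name ∈ imports, kwToTask.get? name = some x)
        ∨ (PySem.Str.isIn "detection" (PySem.Str.lower summary) = true ∧ x = "object_detection")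
        ∨ (PySem.Str.isIn "caption" (PySem.Str.lower summary) = true ∧ x = "captioning")
        ∨ ((PySem.Str.isIn "segment" (PySem.Str.lower summary) || PySem.Str.isIn "matting" (PySem.Str.lower summary)) = true ∧ x = "segmentation")) := by
  simp only [List.mem_append, List.mem_filterMap, summaryRules, List.mem_cons, List.not_mem_nil, or_false]
  constructor
  · rintro (⟨n, hn, hg⟩ | ⟨r, hr, hif⟩)
    · exact Or.inl ⟨n, hn, hg⟩
    · rcases hr with rfl | rfl | rfl | rfl <;>
        simp only [] at hif <;> split at hif <;> simp_all
  · rintro (⟨n, hn, hg⟩ | ⟨hc, rfl⟩ | ⟨hc, rfl⟩ | ⟨hc, rfl⟩)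
    · exact Or.inl ⟨n, hn, hg⟩
    · exact Or.inr ⟨("detection", "object_detection"), by simp, by rw [hc]; rfl⟩
    · exact Or.inr ⟨("caption", "captioning"), by simp, by rw [hc]; rfl⟩
    · rcases Bool.or_eq_true_iff.mp hc with h | h
      · exact Or.inr ⟨("segment", "segmentation"), by simp, by rw [h]; rfl⟩
      · exact Or.inr ⟨("matting", "segmentation"), by simp, by rw [h]; rfl⟩

-- A's pre-fallback set has the same membership
theorem mem_preA (c1 c2 c3 : Bool) (s : PySem.Set String) (x : String) :
    x ∈ addIfB c3 "segmentation" (addIfB c2 "captioning" (addIfB c1 "object_detection" s))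
    ↔ (x ∈ s ∨ (c1 = true ∧ x = "object_detection") ∨ (c2 = true ∧ x = "captioning")
        ∨ (c3 = true ∧ x = "segmentation")) := by
  cases c1 <;> cases c2 <;> cases c3 <;>
    simp [addIfB, PySem.Set.mem_add, eq_comm (a := x)] <;> tauto

-- the two deduplicated collections are permutations of each other
theorem preA_perm (imports : List String) (summary : String) :
    (addIfB (PySem.Str.isIn "segment" (PySem.Str.lower summary) || PySem.Str.isIn "matting" (PySem.Str.lower summary)) "segmentation"
      (addIfB (PySem.Str.isIn "caption" (PySem.Str.lower summary)) "captioning"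
        (addIfB (PySem.Str.isIn "detection" (PySem.Str.lower summary)) "object_detection"
          (pyPatterns.foldl
            (fun ts p => if p.2.any (fun keyword => imports.contains keyword) then PySem.Set.add ts p.1 else ts)
            PySem.Set.empty)))).Perm
    (PySem.Set.ofList
      (imports.filterMap (fun name => kwToTask.get? name)
        ++ summaryRules.filterMap (fun r => if PySem.Str.isIn r.1 (PySem.Str.lower summary) then some r.2 else none))) := by
  refine (List.perm_ext_iff_of_nodup ?_ (PySem.Set.nodup_ofList _)).2 ?_
  · exact addIfB_nodup _ _ _ (addIfB_nodup _ _ _ (addIfB_nodup _ _ _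
      (nodup_afold_gen pyPatterns imports PySem.Set.empty List.nodup_nil)))
  · intro x
    rw [mem_preA, PySem.Set.mem_ofList, mem_hits, afold_iff_lookup]

-- ===== VERDICT (by name: the statement is the Claim_ definition above) =====
theorem infer_tasks_py_spec : Claim_equal_infer_tasks_py := by
  intro imports summary _
  unfold Spec_infer_tasks_py infer_tasks_py_alt
  rw [port_a_eq]
  simp only []
  have hperm := preA_perm imports summary
  have hs : PySem.List.sorted
      (addIfB (PySem.Str.isIn "segment" (PySem.Str.lower summary) || PySem.Str.isIn "matting" (PySem.Str.lower summary)) "segmentation"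
        (addIfB (PySem.Str.isIn "caption" (PySem.Str.lower summary)) "captioning"
          (addIfB (PySem.Str.isIn "detection" (PySem.Str.lower summary)) "object_detection"
            (pyPatterns.foldl
              (fun ts p => if p.2.any (fun keyword => imports.contains keyword) then PySem.Set.add ts p.1 else ts)
              PySem.Set.empty))))
      (fun x => x) false
    = PySem.List.sorted
        (PySem.Set.ofList
          (imports.filterMap (fun name => kwToTask.get? name)
            ++ summaryRules.filterMap (fun r => if PySem.Str.isIn r.1 (PySem.Str.lower summary) then some r.2 else none)))
        (fun x => x) false :=
    PySem.List.sorted_eq_sorted_of_perm _ _ _ (fun a b hab => hab) hperm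
  by_cases hnil : (addIfB (PySem.Str.isIn "segment" (PySem.Str.lower summary) || PySem.Str.isIn "matting" (PySem.Str.lower summary)) "segmentation"
      (addIfB (PySem.Str.isIn "caption" (PySem.Str.lower summary)) "captioning"
        (addIfB (PySem.Str.isIn "detection" (PySem.Str.lower summary)) "object_detection"
          (pyPatterns.foldl
            (fun ts p => if p.2.any (fun keyword => imports.contains keyword) then PySem.Set.add ts p.1 else ts)
            PySem.Set.empty)))) = []
  · -- both sides fall back to ["classification"]
    have hnil' : PySem.Set.ofList
        (imports.filterMap (fun name => kwToTask.get? name)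
          ++ summaryRules.filterMap (fun r => if PySem.Str.isIn r.1 (PySem.Str.lower summary) then some r.2 else none)) = [] := by
      have := hperm; rw [hnil] at this; exact this.nil_eq.symm
    rw [pvFallback, if_pos hnil, hnil, hnil']
    decide
  · have hnil' : ¬ PySem.Set.ofList
        (imports.filterMap (fun name => kwToTask.get? name)
          ++ summaryRules.filterMap (fun r => if PySem.Str.isIn r.1 (PySem.Str.lower summary) then some r.2 else none)) = [] := by
      intro h; exact hnil ((h ▸ hperm).eq_nil)
    rw [pvFallback, if_neg hnil, hs,
      if_neg (fun h => hnil' ((PySem.List.sorted_eq_nil_iff _ _ _).1 h))]
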